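-- pv_equiv track=rewrite | github.com/Scr4tch587/Rootify-2.0 | rootify/api/app/pipeline/influence_rules.py | _truncate_tail
-- ===== SOURCE A (Python) =====
-- _CLAUSE_CUTS_ALWAYS = (" which ", " that ", " while ")
--
-- _CLAUSE_CUTS_COND = (", and ", " and ", ", but ", " but ")
--
-- def _truncate_tail(tail: str) -> str:
--     t = tail.strip()
--     earliest = None
--
--     for token in _CLAUSE_CUTS_ALWAYS:
--         i = t.lower().find(token)
--         if i != -1 and (earliest is None or i < earliest):
--             earliest = i
--
--     for token in _CLAUSE_CUTS_COND:
--         start = 0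
--         tl = t.lower()
--         while True:
--             i = tl.find(token, start)
--             if i == -1:
--                 break
--             j = i + len(token)
--             while j < len(t) and t[j].isspace():
--                 j += 1
--             if j < len(t) and t[j].islower():
--                 if earliest is None or i < earliest:
--                     earliest = i
--                 break
--             start = i + 1
--
--     return t if earliest is None else t[:earliest].strip()
-- ===== SOURCE B (Python) =====
-- _CLAUSE_CUTS_ALWAYS = (" which ", " that ", " while ")
--
-- _CLAUSE_CUTS_COND = (", and ", " and ", ", but ", " but ")
--
--
-- def _truncate_tail(tail: str) -> str:
--     # Single left-to-right scan: cut at the first position where any clause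
--     # token starts (COND tokens must be followed, after whitespace, by a
--     # lowercase char of the original-cased text).
--     t = tail.strip()
--     tl = t.lower()
--     n = len(t)
--     for i in range(n):
--         hit = any(tl.startswith(tok, i) for tok in _CLAUSE_CUTS_ALWAYS)
--         if not hit:
--             for tok in _CLAUSE_CUTS_COND:
--                 if tl.startswith(tok, i):
--                     j = i + len(tok)
--                     while j < n and t[j].isspace():
--                         j += 1
--                     if j < n and t[j].islower():
--                         hit = True
--                         break
--         if hit:
--             return t[:i].strip()
--     return t
-- ===== Notes on version B (the rewrite author's own statement) =====
-- stated objective: alternative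
-- what changed: Replaces A's per-token searches (find per ALWAYS token plus a restart while-loop per COND token, then a running minimum) with a single left-to-right scan over positions that returns at the first position where any token cuts.
import Mathlib
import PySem

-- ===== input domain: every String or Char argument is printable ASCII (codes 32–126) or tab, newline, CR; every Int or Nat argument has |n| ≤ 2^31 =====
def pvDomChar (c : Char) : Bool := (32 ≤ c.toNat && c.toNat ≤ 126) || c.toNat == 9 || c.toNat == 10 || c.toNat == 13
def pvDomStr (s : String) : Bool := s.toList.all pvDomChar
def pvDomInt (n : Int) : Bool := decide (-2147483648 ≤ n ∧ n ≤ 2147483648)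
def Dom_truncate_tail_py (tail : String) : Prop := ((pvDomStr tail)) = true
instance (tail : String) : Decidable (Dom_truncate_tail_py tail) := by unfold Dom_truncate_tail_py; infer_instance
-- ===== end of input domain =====

-- B replaces A's per-token find/while-retry minimum with a single left-to-right scan
-- that stops at the first position where any clause token cuts (objective: alternative).

-- ===== PORT A =====
-- the module constants _CLAUSE_CUTS_ALWAYS / _CLAUSE_CUTS_COND
def pvALWAYS : List (List Char) := [" which ".toList, " that ".toList, " while ".toList]
def pvCOND : List (List Char) := [", and ".toList, " and ".toList, ", but ".toList, " but ".toList]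

-- 'while j < len(t) and t[j].isspace(): j += 1' (shared verbatim by both Pythons)
def skipWs (t : List Char) (j : Nat) : Nat :=
  if h : j < t.length then
    if PySem.Chars.isspace t[j] then skipWs t (j + 1) else j
  else j
termination_by t.length - j

-- 'j = i + len(token); <skip ws>; j < len(t) and t[j].islower()' (shared by both Pythons)
def lowerAfter (t : List Char) (j0 : Nat) : Bool :=
  let j := skipWs t j0
  if h : j < t.length then PySem.Chars.islower t[j] else false

-- A's 'while True' retry loop for one COND token: first occurrence from `start`
-- that passes the lowercase-after-whitespace test.  fuel = t.length + 2 always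
-- suffices because the restart index strictly increases each iteration.
def condFirst (t tl tok : List Char) (start fuel : Nat) : Option Int :=
  match fuel with
  | 0 => none
  | fuel + 1 =>
    let i := PySem.Chars.findFrom tl tok (start : Int) none
    if i = -1 then none
    else if lowerAfter t (i.toNat + tok.length) then some i
    else condFirst t tl tok (i.toNat + 1) fuel

def truncate_tail_py (tail : String) : String :=
  let t := PySem.Chars.strip tail.toList
  let e1 := pvALWAYS.foldl (fun e tok =>
    let i := PySem.Chars.find (PySem.Chars.lower t) tok
    if i ≠ -1 then
      match e with
      | none => some i
      | some m => if i < m then some i else e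
    else e) none
  let e2 := pvCOND.foldl (fun e tok =>
    match condFirst t (PySem.Chars.lower t) tok 0 (t.length + 2) with
    | none => e
    | some i =>
      match e with
      | none => some i
      | some m => if i < m then some i else e) e1
  match e2 with
  | none => String.ofList t
  | some i => String.ofList (PySem.Chars.strip (PySem.Chars.slice t none (some i)))

-- ===== PORT B =====
-- does any clause token cut exactly at position i?  (tl.startswith(tok, i) ported as
-- tok <+: tl.drop i via PySem.Chars.startswith, exact for 0 ≤ i)
def validAt (t tl : List Char) (i : Nat) : Bool :=
  pvALWAYS.any (fun tok => PySem.Chars.startswith (tl.drop i) tok) ||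
  pvCOND.any (fun tok => PySem.Chars.startswith (tl.drop i) tok && lowerAfter t (i + tok.length))

-- 'for i in range(n): if hit: return t[:i].strip()' / final 'return t'
def scanB (t tl : List Char) (i : Nat) : List Char :=
  if h : i < t.length then
    if validAt t tl i then PySem.Chars.strip (t.take i) else scanB t tl (i + 1)
  else t
termination_by t.length - i

def truncate_tail_py_alt (tail : String) : String :=
  let t := PySem.Chars.strip tail.toList
  String.ofList (scanB t (PySem.Chars.lower t) 0)

-- ===== PRECONDITION & SPEC =====
def Spec_truncate_tail_py (tail : String) (out : String) : Prop := out = truncate_tail_py_alt tail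
instance (tail : String) (out : String) : Decidable (Spec_truncate_tail_py tail out) := by unfold Spec_truncate_tail_py; infer_instance

-- ===== CLAIM (what is proved, stated in full; the proofs are below) =====
def Claim_equal_truncate_tail_py : Prop := ∀ (tail : String), Dom_truncate_tail_py tail → Spec_truncate_tail_py tail (truncate_tail_py tail)


-- ===== LEMMAS AND PROOFS =====

-- all clause tokens are nonempty
lemma alw_ne_nil : ∀ tok ∈ pvALWAYS, tok ≠ [] := by decide

lemma cond_ne_nil : ∀ tok ∈ pvCOND, tok ≠ [] := by decide

lemma prefix_drop_lt {tok tl : List Char} {k : Nat} (h : tok <+: tl.drop k) (hne : tok ≠ []) :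
    k < tl.length := by
  by_contra hk
  rw [List.drop_eq_nil_of_le (Nat.le_of_not_lt hk)] at h
  exact hne (List.prefix_nil.mp h)

lemma length_lower (t : List Char) : (PySem.Chars.lower t).length = t.length := by
  simp [PySem.Chars.lower]

lemma validAt_iff (t tl : List Char) (i : Nat) :
    validAt t tl i = true ↔
      (∃ tok ∈ pvALWAYS, tok <+: tl.drop i) ∨
      (∃ tok ∈ pvCOND, tok <+: tl.drop i ∧ lowerAfter t (i + tok.length) = true) := by
  simp [validAt, List.any_eq_true, PySem.Chars.startswith_iff, Bool.and_eq_true]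

-- the running minimum A maintains, as a binary operation
def omin : Option Int → Option Int → Option Int
  | none, b => b
  | some m, none => some m
  | some m, some i => if i < m then some i else some m

-- A's candidate for one ALWAYS token
def candA (tl tok : List Char) : Option Int :=
  if PySem.Chars.find tl tok = -1 then none else some (PySem.Chars.find tl tok)

lemma stepA_eq (tl : List Char) :
    (fun (e : Option Int) (tok : List Char) =>
      let i := PySem.Chars.find tl tok
      if i ≠ -1 then
        match e with
        | none => some i
        | some m => if i < m then some i else e
      else e) = fun e tok => omin e (candA tl tok) := by
  funext e tok
  cases e <;> simp only [candA, omin] <;> split_ifs <;> simp_all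

lemma stepC_eq (t tl : List Char) :
    (fun (e : Option Int) (tok : List Char) =>
      match condFirst t tl tok 0 (t.length + 2) with
      | none => e
      | some i =>
        match e with
        | none => some i
        | some m => if i < m then some i else e) =
    fun e tok => omin e (condFirst t tl tok 0 (t.length + 2)) := by
  funext e tok
  cases h : condFirst t tl tok 0 (t.length + 2) <;> cases e <;> simp [omin]

lemma omin_eq_none {a b : Option Int} : omin a b = none ↔ a = none ∧ b = none := by
  cases a <;> cases b <;> simp [omin] <;> split_ifs <;> simp

lemma omin_some {a b : Option Int} {v : Int} (h : omin a b = some v) :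
    (a = some v ∨ b = some v) ∧ (∀ w, a = some w → v ≤ w) ∧ (∀ w, b = some w → v ≤ w) := by
  rcases a with _ | m <;> rcases b with _ | i
  · simp [omin] at h
  · simp only [omin] at h
    injection h with h; subst h
    refine ⟨Or.inr rfl, ?_, ?_⟩
    · intro w hw; exact absurd hw (by simp)
    · intro w hw; injection hw with hw; omega
  · simp only [omin] at h
    injection h with h; subst h
    refine ⟨Or.inl rfl, ?_, ?_⟩
    · intro w hw; injection hw with hw; omega
    · intro w hw; exact absurd hw (by simp)
  · simp only [omin] at h
    split_ifs at h with hlt <;> injection h with h <;> subst h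
    · refine ⟨Or.inr rfl, ?_, ?_⟩ <;> intro w hw <;> injection hw with hw <;> omega
    · refine ⟨Or.inl rfl, ?_, ?_⟩ <;> intro w hw <;> injection hw with hw <;> omega

lemma foldl_omin_none_iff {α : Type} (f : α → Option Int) (L : List α) (a : Option Int) :
    L.foldl (fun e x => omin e (f x)) a = none ↔ a = none ∧ ∀ x ∈ L, f x = none := by
  induction L generalizing a with
  | nil => simp
  | cons x L ih =>
    rw [List.foldl_cons, ih, omin_eq_none]
    constructor
    · rintro ⟨⟨h1, h2⟩, h3⟩
      refine ⟨h1, fun y hy => ?_⟩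
      rcases List.mem_cons.mp hy with rfl | hy'
      · exact h2
      · exact h3 y hy'
    · rintro ⟨h1, h2⟩
      exact ⟨⟨h1, h2 x (by simp)⟩, fun y hy => h2 y (List.mem_cons_of_mem _ hy)⟩

lemma foldl_omin_some {α : Type} (f : α → Option Int) (L : List α) (a : Option Int) (v : Int)
    (h : L.foldl (fun e x => omin e (f x)) a = some v) :
    (a = some v ∨ ∃ x ∈ L, f x = some v) ∧ (∀ w, a = some w → v ≤ w) ∧
      (∀ x ∈ L, ∀ w, f x = some w → v ≤ w) := by
  induction L generalizing a with
  | nil => simp at h; exact ⟨Or.inl h, by simp [h], by simp⟩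
  | cons x L ih =>
    rw [List.foldl_cons] at h
    obtain ⟨hsrc, hinit, hrest⟩ := ih (omin a (f x)) h
    constructor
    · rcases hsrc with hsrc | ⟨y, hy, hfy⟩
      · rcases (omin_some hsrc).1 with h1 | h1
        · exact Or.inl h1
        · exact Or.inr ⟨x, by simp, h1⟩
      · exact Or.inr ⟨y, by simp [hy], hfy⟩
    constructor
    · intro w hw
      rcases hsrc with hsrc | ⟨y, hy, hfy⟩
      · exact (omin_some hsrc).2.1 w hw
      · -- v comes from later candidates; compare through omin a (f x)
        rcases hmo : omin a (f x) with _ | u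
        · rw [omin_eq_none] at hmo; simp [hmo.1] at hw
        · have hvu := hinit u hmo
          have := (omin_some hmo).2.1 w hw
          omega
    · intro y hy w hw
      rcases List.mem_cons.mp hy with rfl | hy'
      · rcases hmo : omin a (f y) with _ | u
        · rw [omin_eq_none] at hmo; simp [hmo.2] at hw
        · have hvu := hinit u hmo
          have := (omin_some hmo).2.2 w hw
          omega
      · exact hrest y hy' w hw

lemma candA_some {tl tok : List Char} {v : Int} (h : candA tl tok = some v) :
    0 ≤ v ∧ tok <+: tl.drop v.toNat := by
  unfold candA at h
  split_ifs at h with hne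
  obtain rfl : PySem.Chars.find tl tok = v := by simpa using h
  have hinf : tok <:+: tl := (PySem.Chars.find_ne_neg_one_iff tl tok).mp hne
  have h0 : 0 ≤ PySem.Chars.find tl tok := (PySem.Chars.find_nonneg_iff tl tok).mpr hinf
  exact ⟨h0, (PySem.Chars.find_spec h0).1⟩

lemma candA_le {tl tok : List Char} {k : Nat} (h : tok <+: tl.drop k) :
    ∃ v : Int, candA tl tok = some v ∧ v ≤ (k : Int) := by
  have hin : PySem.Chars.isIn tok tl = true :=
    (PySem.Chars.exists_prefix_drop_iff_isIn tok tl).mp ⟨k, h⟩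
  have hinf : tok <:+: tl := (PySem.Chars.isIn_iff_infix tok tl).mp hin
  have hne : PySem.Chars.find tl tok ≠ -1 := (PySem.Chars.find_ne_neg_one_iff tl tok).mpr hinf
  have h0 : 0 ≤ PySem.Chars.find tl tok := (PySem.Chars.find_nonneg_iff tl tok).mpr hinf
  refine ⟨PySem.Chars.find tl tok, by simp [candA, hne], ?_⟩
  have hmin := (PySem.Chars.find_spec h0).2
  have : ¬ k < (PySem.Chars.find tl tok).toNat := fun hk => hmin k hk h
  omega

-- full specification of A's retry loop for one COND token
lemma condFirst_spec (t tl tok : List Char) (htok : tok ≠ []) :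
    ∀ fuel start, start ≤ tl.length → tl.length + 1 ≤ fuel + start →
      (condFirst t tl tok start fuel = none →
        ∀ k, start ≤ k → ¬(tok <+: tl.drop k ∧ lowerAfter t (k + tok.length) = true)) ∧
      (∀ v, condFirst t tl tok start fuel = some v →
        (start : Int) ≤ v ∧ tok <+: tl.drop v.toNat ∧
          lowerAfter t (v.toNat + tok.length) = true ∧
          ∀ k, start ≤ k → k < v.toNat →
            ¬(tok <+: tl.drop k ∧ lowerAfter t (k + tok.length) = true)) := by
  intro fuel
  induction fuel with
  | zero => intro start h1 h2; omega
  | succ fuel ih =>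
    intro start h1 h2
    by_cases hneg : PySem.Chars.findFrom tl tok (start : Int) none = -1
    · rw [condFirst]
      rw [if_pos hneg]
      refine ⟨?_, fun v hv => absurd hv (by simp)⟩
      intro _ k hk ⟨hpre, _⟩
      have : ¬ tok <:+: tl.drop start :=
        (PySem.Chars.findFrom_natCast_eq_neg_one_iff tl tok start h1).mp hneg
      apply this
      have hdrop : (tl.drop start).drop (k - start) = tl.drop k := by
        rw [List.drop_drop]; congr 1; omega
      exact (PySem.Chars.isIn_iff_infix _ _).mp
        ((PySem.Chars.exists_prefix_drop_iff_isIn _ _).mp ⟨k - start, by rw [hdrop]; exact hpre⟩)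
    · obtain ⟨hge, hpre, hmin⟩ := PySem.Chars.findFrom_natCast_spec tl tok start h1 hneg
      rw [condFirst]
      set r := PySem.Chars.findFrom tl tok (start : Int) none with hr
      have hr0 : 0 ≤ r := le_trans (by exact_mod_cast Nat.zero_le start) hge
      have hrlt : r.toNat < tl.length := prefix_drop_lt hpre htok
      rw [if_neg hneg]
      by_cases hlow : lowerAfter t (r.toNat + tok.length) = true
      · rw [if_pos hlow]
        refine ⟨by intro hv; exact absurd hv (by simp), ?_⟩
        rintro v hv
        obtain rfl : r = v := by simpa using hv
        refine ⟨hge, hpre, hlow, ?_⟩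
        intro k hk1 hk2 ⟨hp, _⟩
        exact hmin k hk1 hk2 hp
      · rw [if_neg hlow]
        have hstart' : r.toNat + 1 ≤ tl.length := hrlt
        have hfuel' : tl.length + 1 ≤ fuel + (r.toNat + 1) := by
          have : start ≤ r.toNat := by omega
          omega
        obtain ⟨ihnone, ihsome⟩ := ih (r.toNat + 1) hstart' hfuel'
        have hcover : ∀ k, start ≤ k → k ≤ r.toNat →
            ¬(tok <+: tl.drop k ∧ lowerAfter t (k + tok.length) = true) := by
          rintro k hk1 hk2 ⟨hp, hl⟩
          rcases Nat.lt_or_ge k r.toNat with hlt | hge'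
          · exact hmin k hk1 hlt hp
          · have : k = r.toNat := by omega
            subst this
            exact hlow hl
        refine ⟨?_, ?_⟩
        · intro hnone k hk
          rcases Nat.lt_or_ge k (r.toNat + 1) with hlt | hge'
          · exact hcover k hk (by omega)
          · exact ihnone hnone k hge'
        · intro v hv
          obtain ⟨hv1, hv2, hv3, hv4⟩ := ihsome v hv
          refine ⟨by omega, hv2, hv3, ?_⟩
          intro k hk1 hk2
          rcases Nat.lt_or_ge k (r.toNat + 1) with hlt | hge'
          · exact hcover k hk1 (by omega)
          · exact hv4 k hge' hk2

lemma scanB_of_none (t tl : List Char) :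
    ∀ d i, t.length - i ≤ d → (∀ k, validAt t tl k = false) → scanB t tl i = t := by
  intro d
  induction d with
  | zero =>
    intro i hd h
    rw [scanB]
    have : ¬ i < t.length := by omega
    simp [this]
  | succ d ih =>
    intro i hd h
    rw [scanB]
    split_ifs with h1 h2
    · simp [h i] at h2
    · exact ih (i + 1) (by omega) h
    · rfl

lemma scanB_of_least (t tl : List Char) (m : Nat) (hval : validAt t tl m = true)
    (hmlt : m < t.length) :
    ∀ d i, m - i ≤ d → i ≤ m → (∀ k, k < m → validAt t tl k = false) →
      scanB t tl i = PySem.Chars.strip (t.take m) := by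
  intro d
  induction d with
  | zero =>
    intro i hd hi _
    have : i = m := by omega
    subst this
    rw [scanB]
    simp [hmlt, hval]
  | succ d ih =>
    intro i hd hi hmin
    rcases Nat.eq_or_lt_of_le hi with rfl | hlt
    · rw [scanB]; simp [hmlt, hval]
    · rw [scanB]
      have h1 : i < t.length := by omega
      have h2 : validAt t tl i = false := hmin i hlt
      rw [dif_pos h1, h2, if_neg (show ¬(false = true) by simp)]
      exact ih (i + 1) (by omega) (by omega) hmin

theorem truncate_tail_py_main (tail : String) :
    truncate_tail_py tail = truncate_tail_py_alt tail := by
  simp only [truncate_tail_py, truncate_tail_py_alt]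
  set t := PySem.Chars.strip tail.toList with ht
  set tl := PySem.Chars.lower t with htl
  have hlen : tl.length = t.length := length_lower t
  rw [stepA_eq tl, stepC_eq t tl]
  -- every candidate value is a valid cut position
  have hcandA_valid : ∀ tok ∈ pvALWAYS, ∀ v : Int, candA tl tok = some v →
      0 ≤ v ∧ validAt t tl v.toNat = true := by
    intro tok htokm v hv
    obtain ⟨h0, hp⟩ := candA_some hv
    exact ⟨h0, (validAt_iff t tl v.toNat).mpr (Or.inl ⟨tok, htokm, hp⟩)⟩
  have hcandC_valid : ∀ tok ∈ pvCOND, ∀ v : Int,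
      condFirst t tl tok 0 (t.length + 2) = some v →
      0 ≤ v ∧ validAt t tl v.toNat = true := by
    intro tok htokm v hv
    obtain ⟨h0, hp, hl, _⟩ :=
      ((condFirst_spec t tl tok (cond_ne_nil tok htokm) (t.length + 2) 0 (by omega)
        (by omega)).2) v hv
    exact ⟨h0, (validAt_iff t tl v.toNat).mpr (Or.inr ⟨tok, htokm, hp, hl⟩)⟩
  by_cases hex : ∃ k, validAt t tl k = true
  · -- there is a cut; both sides produce the earliest one
    classical
    set m := Nat.find hex with hm
    have hmval : validAt t tl m = true := Nat.find_spec hex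
    have hmmin : ∀ k, k < m → validAt t tl k = false := by
      intro k hk
      have := Nat.find_min hex hk
      simpa using this
    have hmlt : m < t.length := by
      rcases (validAt_iff t tl m).mp hmval with ⟨tok, htokm, hp⟩ | ⟨tok, htokm, hp, _⟩
      · have := prefix_drop_lt hp (alw_ne_nil tok htokm); omega
      · have := prefix_drop_lt hp (cond_ne_nil tok htokm); omega
    -- every candidate is ≥ m
    have hge : ∀ v : Int, (0 ≤ v ∧ validAt t tl v.toNat = true) → (m : Int) ≤ v := by
      rintro v ⟨h0, hvv⟩
      have := Nat.find_le (h := hex) hvv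
      omega
    -- the fold over both token lists yields exactly some m
    have he2 : pvCOND.foldl (fun e tok => omin e (condFirst t tl tok 0 (t.length + 2)))
        (pvALWAYS.foldl (fun e tok => omin e (candA tl tok)) none) = some (m : Int) := by
      rcases (validAt_iff t tl m).mp hmval with ⟨tok, htokm, hp⟩ | ⟨tok, htokm, hp, hl⟩
      · -- the witness token is an ALWAYS token: the inner fold already yields some m
        obtain ⟨v, hv, hvle⟩ := candA_le hp
        have hveq : v = (m : Int) := by
          have := hge v (hcandA_valid tok htokm v hv)
          omega
        subst hveq
        have he1 : pvALWAYS.foldl (fun e tok => omin e (candA tl tok)) none = some (m : Int) := by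
          rcases h1 : pvALWAYS.foldl (fun e tok => omin e (candA tl tok)) none with _ | u
          · rw [foldl_omin_none_iff] at h1
            rw [h1.2 tok htokm] at hv; exact absurd hv (by simp)
          · obtain ⟨hsrc, _, hle⟩ := foldl_omin_some _ _ _ _ h1
            have hu1 : (m : Int) ≤ u := by
              rcases hsrc with hsrc | ⟨y, hy, hfy⟩
              · simp at hsrc
              · exact hge u (hcandA_valid y hy u hfy)
            have hu2 : u ≤ (m : Int) := hle tok htokm _ hv
            congr 1; omega
        rw [he1]
        rcases h2 : pvCOND.foldl (fun e tok => omin e (condFirst t tl tok 0 (t.length + 2)))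
            (some (m : Int)) with _ | u
        · rw [foldl_omin_none_iff] at h2; simp at h2
        · obtain ⟨hsrc, hinit, _⟩ := foldl_omin_some _ _ _ _ h2
          have hu1 : (m : Int) ≤ u := by
            rcases hsrc with hsrc | ⟨y, hy, hfy⟩
            · injection hsrc with hsrc; omega
            · exact hge u (hcandC_valid y hy u hfy)
          have hu2 : u ≤ (m : Int) := hinit _ rfl
          congr 1; omega
      · -- the witness token is a COND token
        have hspec := condFirst_spec t tl tok (cond_ne_nil tok htokm) (t.length + 2) 0
          (by omega) (by omega)
        rcases hcf : condFirst t tl tok 0 (t.length + 2) with _ | v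
        · exact absurd ⟨hp, hl⟩ (hspec.1 hcf m (Nat.zero_le m))
        · have hveq : v = (m : Int) := by
            obtain ⟨h0, hp', hl', hmin'⟩ := hspec.2 v hcf
            have h1 : (m : Int) ≤ v := hge v (hcandC_valid tok htokm v hcf)
            have h2 : ¬ m < v.toNat := fun hlt => hmin' m (Nat.zero_le m) hlt ⟨hp, hl⟩
            omega
          subst hveq
          rcases h2 : pvCOND.foldl (fun e tok => omin e (condFirst t tl tok 0 (t.length + 2)))
              (pvALWAYS.foldl (fun e tok => omin e (candA tl tok)) none) with _ | u
          · rw [foldl_omin_none_iff] at h2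
            rw [h2.2 tok htokm] at hcf; exact absurd hcf (by simp)
          · obtain ⟨hsrc, _, hle⟩ := foldl_omin_some _ _ _ _ h2
            have hu1 : (m : Int) ≤ u := by
              rcases hsrc with hsrc | ⟨y, hy, hfy⟩
              · rcases h1 : pvALWAYS.foldl (fun e tok => omin e (candA tl tok)) none with _ | w
                · rw [h1] at hsrc; simp at hsrc
                · rw [h1] at hsrc
                  obtain ⟨hsrc', _, _⟩ := foldl_omin_some _ _ _ _ h1
                  rcases hsrc' with h' | ⟨z, hz, hfz⟩
                  · simp at h'
                  · have := hge w (hcandA_valid z hz w hfz)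
                    simp at hsrc; omega
              · exact hge u (hcandC_valid y hy u hfy)
            have hu2 : u ≤ (m : Int) := hle tok htokm _ hcf
            congr 1; omega
    rw [he2]
    have hrhs := scanB_of_least t tl m hmval hmlt m 0 (by omega) (Nat.zero_le m) hmmin
    rw [hrhs]
    simp only [PySem.Chars.slice_eq_listSlice, PySem.List.slice_to_natCast]
  · -- no cut anywhere: both sides return t unchanged
    have hall : ∀ k, validAt t tl k = false := by
      intro k
      rcases h : validAt t tl k
      · rfl
      · exact absurd ⟨k, h⟩ hex
    have he1 : pvALWAYS.foldl (fun e tok => omin e (candA tl tok)) none = none := by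
      rw [foldl_omin_none_iff]
      refine ⟨rfl, fun tok htokm => ?_⟩
      rcases h : candA tl tok with _ | v
      · rfl
      · have := (hcandA_valid tok htokm v h).2
        rw [hall] at this; exact absurd this (by simp)
    have he2 : pvCOND.foldl (fun e tok => omin e (condFirst t tl tok 0 (t.length + 2)))
        (pvALWAYS.foldl (fun e tok => omin e (candA tl tok)) none) = none := by
      rw [foldl_omin_none_iff, he1]
      refine ⟨rfl, fun tok htokm => ?_⟩
      rcases h : condFirst t tl tok 0 (t.length + 2) with _ | v
      · rfl
      · have := (hcandC_valid tok htokm v h).2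
        rw [hall] at this; exact absurd this (by simp)
    rw [he2, scanB_of_none t tl t.length 0 (by omega) hall]

-- ===== VERDICT (by name: the statement is the Claim_ definition above) =====
theorem truncate_tail_py_spec : Claim_equal_truncate_tail_py := by
  intro tail _
  unfold Spec_truncate_tail_py
  exact truncate_tail_py_main tail
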